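-- pv_equiv track=rewrite | github.com/bankielewicz/DevForgeAI | src/dependency_graph_analyzer.py | generate_visualization
-- ===== SOURCE A (Python) =====
-- def generate_visualization(story_id: str, graph: dict, status_map: dict, depth: int = 0, visited: set = None) -> str:
--     """
--     Generate ASCII tree visualization of dependency chain.
--
--     Args:
--         story_id: Root story ID
--         graph: Adjacency list {story_id: [dependency_ids]}
--         status_map: Dict mapping story_id to status string
--         depth: Current depth (for indentation)
--         visited: Set of already visited nodes (prevents infinite recursion on cycles)
--
--     Returns:
--         ASCII tree string
--     """
--     if visited is None:
--         visited = set()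
--
--     indent = "  " * depth
--     connector = "└── " if depth > 0 else ""
--
--     status = status_map.get(story_id, "")
--
--     # Determine status icon
--     if "Approved" in status or "Complete" in status or "Released" in status:
--         status_icon = "✅"
--     else:
--         status_icon = "⏳"
--
--     # Check for cycle
--     if story_id in visited:
--         if status:
--             line = f"{indent}{connector}{story_id} 🔄 ({status}) [CIRCULAR]"
--         else:
--             line = f"{indent}{connector}{story_id} 🔄 [CIRCULAR]"
--         return line
--
--     visited.add(story_id)
--
--     # Build current line
--     if status:
--         line = f"{indent}{connector}{story_id} {status_icon} ({status})"
--     else: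
--         line = f"{indent}{connector}{story_id}"
--
--     lines = [line]
--
--     # Recurse for dependencies
--     for dep in graph.get(story_id, []):
--         dep_viz = generate_visualization(dep, graph, status_map, depth + 1, visited.copy())
--         lines.append(dep_viz)
--
--     return "\n".join(lines)
-- ===== SOURCE B (Python) =====
-- def generate_visualization(story_id: str, graph: dict, status_map: dict, depth: int = 0, visited: set = None) -> str:
--     """Iterative explicit-stack preorder traversal; builds a flat list of lines and joins once."""
--     if visited is None:
--         visited = set()
--     lines = []
--     stack = [(story_id, depth, visited)]
--     while stack:
--         sid, d, vis = stack.pop()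
--         indent = "  " * d
--         connector = "└── " if d > 0 else ""
--         status = status_map.get(sid, "")
--         if sid in vis:
--             if status:
--                 lines.append(f"{indent}{connector}{sid} 🔄 ({status}) [CIRCULAR]")
--             else:
--                 lines.append(f"{indent}{connector}{sid} 🔄 [CIRCULAR]")
--             continue
--         icon = "✅" if ("Approved" in status or "Complete" in status or "Released" in status) else "⏳"
--         if status:
--             lines.append(f"{indent}{connector}{sid} {icon} ({status})")
--         else:
--             lines.append(f"{indent}{connector}{sid}")
--         child_vis = vis | {sid}
--         for dep in reversed(graph.get(sid, [])):
--             stack.append((dep, d + 1, child_vis))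
--     return "\n".join(lines)
-- ===== Notes on version B (the rewrite author's own statement) =====
-- stated objective: alternative
-- what changed: The per-subtree recursive string building (each child rendered to a joined string, re-joined at every level) is replaced by an iterative explicit-stack preorder traversal that emits a flat list of lines and joins once; return-value equivalence only: A also mutates the caller's visited set (adds the root id), B does not.
import Mathlib
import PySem

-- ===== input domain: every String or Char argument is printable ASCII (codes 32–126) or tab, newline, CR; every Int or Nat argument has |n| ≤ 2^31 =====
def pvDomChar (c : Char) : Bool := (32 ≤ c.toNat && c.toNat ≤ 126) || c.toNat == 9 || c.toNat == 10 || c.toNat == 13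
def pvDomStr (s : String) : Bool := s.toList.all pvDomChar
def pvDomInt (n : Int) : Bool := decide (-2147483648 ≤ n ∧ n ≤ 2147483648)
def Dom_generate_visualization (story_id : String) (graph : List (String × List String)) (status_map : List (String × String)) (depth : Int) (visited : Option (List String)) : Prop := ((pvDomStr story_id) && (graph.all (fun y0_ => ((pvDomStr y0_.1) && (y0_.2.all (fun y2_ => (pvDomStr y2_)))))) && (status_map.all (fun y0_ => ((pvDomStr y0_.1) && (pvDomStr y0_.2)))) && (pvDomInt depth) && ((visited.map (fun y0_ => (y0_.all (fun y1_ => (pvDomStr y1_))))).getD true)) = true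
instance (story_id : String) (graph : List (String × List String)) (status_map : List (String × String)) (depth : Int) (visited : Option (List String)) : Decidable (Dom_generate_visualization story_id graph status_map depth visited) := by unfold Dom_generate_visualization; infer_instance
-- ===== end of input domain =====

-- B replaces A's per-subtree recursive string building by an iterative explicit-stack preorder
-- traversal emitting a flat line list joined once (objective: alternative decomposition).
-- Return-value equivalence only: Python A mutates the caller's visited set (adds the root id); B does not.

-- ===== PORT A =====
-- termination measure: how many occurrences of ids in the graph are not yet visited
def pvW (graph : List (String × List String)) (vis : List String) : Nat :=
  ((graph.map Prod.fst ++ (graph.map Prod.snd).flatten).filter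
    (fun x => !(PySem.Set.contains vis x))).length

-- general fact specialised to our filter predicates (strict monotonicity of filter length)
theorem pvFilterLt (l : List String) (p q : String → Bool) (hpq : ∀ y, q y = true → p y = true)
    (x : String) (hx : x ∈ l) (hp : p x = true) (hq : q x = false) :
    (l.filter q).length < (l.filter p).length := by
  induction l with
  | nil => simp at hx
  | cons a t ih =>
    have hle : (t.filter q).length ≤ (t.filter p).length :=
      List.Sublist.length_le (List.monotone_filter_right t
        (fun a h => Bool.eq_false_imp_eq_true.mp (fun _ => hpq a h)))
    rcases List.mem_cons.1 hx with rfl | hx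
    · simp only [List.filter_cons, hp, hq]
      simp
      omega
    · by_cases hqa : q a = true
      · simp only [List.filter_cons, hqa, hpq a hqa]
        simp
        have := ih hx; omega
      · rw [Bool.not_eq_true] at hqa
        simp only [List.filter_cons, hqa]
        by_cases hpa : p a = true
        · simp [hpa]; have := ih hx; omega
        · simp only [Bool.not_eq_true] at hpa; simp [hpa]; exact ih hx

theorem pvW_lt (graph : List (String × List String)) (vis : List String) (sid : String)
    (h1 : sid ∈ graph.map Prod.fst) (h2 : PySem.Set.contains vis sid = false) :
    pvW graph (PySem.Set.add vis sid) < pvW graph vis := by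
  have hadd : PySem.Set.add vis sid = vis ++ [sid] := by simp_all [PySem.Set.add]
  unfold pvW
  rw [hadd]
  refine pvFilterLt _ _ _ (fun y hy => ?_) sid (by simp [h1]) ?_ ?_
  · simp only [Bool.not_eq_true'] at hy
    simp only [Bool.not_eq_true']
    simp only [PySem.Set.contains_eq_listContains, List.contains_eq_mem, decide_eq_false_iff_not,
      List.mem_append] at hy ⊢
    tauto
  · simp only [Bool.not_eq_true']; exact h2
  · simp

theorem pv_mem_keys_of_getD_mem (graph : List (String × List String)) (sid dep : String)
    (h : dep ∈ PySem.Dict.getD (PySem.Dict.mk graph) sid []) : sid ∈ graph.map Prod.fst := by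
  by_contra hmem
  have hc : (PySem.Dict.mk graph).contains sid = false := by
    rw [Bool.eq_false_iff]
    intro hct
    exact hmem (by simpa using (PySem.Dict.contains_iff_mem_keys _ sid).mp hct)
  rw [PySem.Dict.getD_of_not_contains _ _ hc] at h
  simp at h

-- recursive helper of A (Python's generate_visualization after the `visited is None` default is resolved)
def pvGoA (graph : List (String × List String)) (status_map : List (String × String))
    (sid : String) (depth : Int) (vis : List String) : String :=
  let indent := String.ofList (PySem.List.pyRepeat "  ".toList depth)
  let connector := if depth > 0 then "└── " else ""
  let status := PySem.Dict.getD (PySem.Dict.mk status_map) sid ""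
  let status_icon := if PySem.Str.isIn "Approved" status || PySem.Str.isIn "Complete" status
      || PySem.Str.isIn "Released" status then "✅" else "⏳"
  if hc : PySem.Set.contains vis sid = true then
    if status = "" then indent ++ connector ++ sid ++ " 🔄 [CIRCULAR]"
    else indent ++ connector ++ sid ++ " 🔄 (" ++ status ++ ") [CIRCULAR]"
  else
    let vis' := PySem.Set.add vis sid
    let line := if status = "" then indent ++ connector ++ sid
      else indent ++ connector ++ sid ++ " " ++ status_icon ++ " (" ++ status ++ ")"
    let lines := line :: (PySem.Dict.getD (PySem.Dict.mk graph) sid []).attach.map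
      (fun d => pvGoA graph status_map d.1 (depth + 1) vis')
    PySem.Str.join "\n" lines
termination_by pvW graph vis
decreasing_by
  exact pvW_lt graph vis sid (pv_mem_keys_of_getD_mem graph sid _ d.2) (by simpa using hc)

def generate_visualization (story_id : String) (graph : List (String × List String)) (status_map : List (String × String)) (depth : Int) (visited : Option (List String)) : String :=
  pvGoA graph status_map story_id depth (visited.getD [])

-- ===== PORT B =====
-- the while-stack loop of Source B; frames are (sid, depth, visited); fuel only makes the loop total
def pvLoopB (graph : List (String × List String)) (status_map : List (String × String)) :
    Nat → List (String × Int × List String) → List String → List String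
  | 0, _, acc => acc
  | _ + 1, [], acc => acc
  | fuel + 1, (sid, d, vis) :: rest, acc =>
    let indent := String.ofList (PySem.List.pyRepeat "  ".toList d)
    let connector := if d > 0 then "└── " else ""
    let status := PySem.Dict.getD (PySem.Dict.mk status_map) sid ""
    if PySem.Set.contains vis sid = true then
      let line := if status = "" then indent ++ connector ++ sid ++ " 🔄 [CIRCULAR]"
        else indent ++ connector ++ sid ++ " 🔄 (" ++ status ++ ") [CIRCULAR]"
      pvLoopB graph status_map fuel rest (acc ++ [line])
    else
      let icon := if PySem.Str.isIn "Approved" status || PySem.Str.isIn "Complete" status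
          || PySem.Str.isIn "Released" status then "✅" else "⏳"
      let line := if status = "" then indent ++ connector ++ sid
        else indent ++ connector ++ sid ++ " " ++ icon ++ " (" ++ status ++ ")"
      let child_vis := PySem.Set.add vis sid
      pvLoopB graph status_map fuel
        (((PySem.Dict.getD (PySem.Dict.mk graph) sid []).map (fun dep => (dep, d + 1, child_vis))) ++ rest)
        (acc ++ [line])

def generate_visualization_alt (story_id : String) (graph : List (String × List String)) (status_map : List (String × String)) (depth : Int) (visited : Option (List String)) : String :=
  let vis0 := visited.getD []
  -- fuel: a bound on the number of pops, proved sufficient below (pvSize_le); the Python loop has no fuel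
  let fuel := ((graph.map (fun p => p.2.length)).sum + 1) ^
      ((graph.map Prod.fst ++ (graph.map Prod.snd).flatten).length + 1)
  PySem.Str.join "\n" (pvLoopB graph status_map fuel [(story_id, depth, vis0)] [])

-- ===== PRECONDITION & SPEC =====
def Spec_generate_visualization (story_id : String) (graph : List (String × List String)) (status_map : List (String × String)) (depth : Int) (visited : Option (List String)) (out : String) : Prop := out = generate_visualization_alt story_id graph status_map depth visited
instance (story_id : String) (graph : List (String × List String)) (status_map : List (String × String)) (depth : Int) (visited : Option (List String)) (out : String) : Decidable (Spec_generate_visualization story_id graph status_map depth visited out) := by unfold Spec_generate_visualization; infer_instance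

-- ===== CLAIM (what is proved, stated in full; the proofs are below) =====
def Claim_equal_generate_visualization : Prop := ∀ (story_id : String) (graph : List (String × List String)) (status_map : List (String × String)) (depth : Int) (visited : Option (List String)), Dom_generate_visualization story_id graph status_map depth visited → Spec_generate_visualization story_id graph status_map depth visited (generate_visualization story_id graph status_map depth visited)

-- ===== LEMMAS AND PROOFS =====

-- the flat line list of A's tree (proof-side characterisation of A's result)
def pvLines (graph : List (String × List String)) (status_map : List (String × String))
    (sid : String) (depth : Int) (vis : List String) : List String :=
  let indent := String.ofList (PySem.List.pyRepeat "  ".toList depth)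
  let connector := if depth > 0 then "└── " else ""
  let status := PySem.Dict.getD (PySem.Dict.mk status_map) sid ""
  let status_icon := if PySem.Str.isIn "Approved" status || PySem.Str.isIn "Complete" status
      || PySem.Str.isIn "Released" status then "✅" else "⏳"
  if hc : PySem.Set.contains vis sid = true then
    [if status = "" then indent ++ connector ++ sid ++ " 🔄 [CIRCULAR]"
     else indent ++ connector ++ sid ++ " 🔄 (" ++ status ++ ") [CIRCULAR]"]
  else
    let vis' := PySem.Set.add vis sid
    let line := if status = "" then indent ++ connector ++ sid
      else indent ++ connector ++ sid ++ " " ++ status_icon ++ " (" ++ status ++ ")"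
    line :: (PySem.Dict.getD (PySem.Dict.mk graph) sid []).attach.flatMap
      (fun d => pvLines graph status_map d.1 (depth + 1) vis')
termination_by pvW graph vis
decreasing_by
  exact pvW_lt graph vis sid (pv_mem_keys_of_getD_mem graph sid _ d.2) (by simpa using hc)

-- number of emitted lines (= number of pops B's loop spends on the subtree)
def pvSize (graph : List (String × List String)) (sid : String) (vis : List String) : Nat :=
  if hc : PySem.Set.contains vis sid = true then 1
  else
    1 + ((PySem.Dict.getD (PySem.Dict.mk graph) sid []).attach.map
      (fun d => pvSize graph d.1 (PySem.Set.add vis sid))).sum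
termination_by pvW graph vis
decreasing_by
  exact pvW_lt graph vis sid (pv_mem_keys_of_getD_mem graph sid _ d.2) (by simpa using hc)

-- joining per-group joined strings equals joining the flat list (groups nonempty)
theorem pvJoinAppend (sep : List Char) (a b : List (List Char)) (ha : a ≠ []) (hb : b ≠ []) :
    PySem.Chars.join sep (a ++ b) = PySem.Chars.join sep a ++ sep ++ PySem.Chars.join sep b := by
  induction a with
  | nil => exact absurd rfl ha
  | cons x a' ih =>
    rcases a' with _ | ⟨y, rest⟩
    · rcases b with _ | ⟨q, brest⟩
      · exact absurd rfl hb
      · simp [PySem.Chars.join_cons_cons, PySem.Chars.join_singleton]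
    · rw [List.cons_append, List.cons_append, PySem.Chars.join_cons_cons,
        PySem.Chars.join_cons_cons]
      rw [show y :: (rest ++ b) = (y :: rest) ++ b from rfl, ih (by simp)]
      simp [List.append_assoc]

theorem pvJoinFlatten (sep : List Char) (xs : List (List (List Char))) (h : ∀ x ∈ xs, x ≠ []) :
    PySem.Chars.join sep (xs.map (PySem.Chars.join sep)) = PySem.Chars.join sep xs.flatten := by
  induction xs with
  | nil => simp
  | cons a t ih =>
    rcases t with _ | ⟨b, t'⟩
    · simp
    · have ha : a ≠ [] := h a (by simp)
      have hflat : (b :: t').flatten ≠ [] := by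
        have hb : b ≠ [] := h b (by simp)
        rcases b with _ | ⟨c, cs⟩
        · exact absurd rfl hb
        · simp
      rw [List.map_cons, List.flatten_cons]
      rw [show ((b :: t').map (PySem.Chars.join sep)) = PySem.Chars.join sep b :: t'.map (PySem.Chars.join sep) from rfl]
      rw [PySem.Chars.join_cons_cons]
      rw [show PySem.Chars.join sep b :: t'.map (PySem.Chars.join sep) = (b::t').map (PySem.Chars.join sep) from rfl]
      rw [ih (fun x hx => h x (by simp [hx]))]
      rw [pvJoinAppend sep a (b :: t').flatten ha hflat]

theorem pvStrJoinFlatten (l : String) (xs : List (List String)) (h : ∀ x ∈ xs, x ≠ []) :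
    PySem.Str.join "\n" (l :: xs.map (PySem.Str.join "\n")) = PySem.Str.join "\n" (l :: xs.flatten) := by
  have key := pvJoinFlatten "\n".toList ([l.toList] :: xs.map (fun g => g.map String.toList))
      (by
        intro x hx
        rcases List.mem_cons.1 hx with hx | hx
        · subst hx; simp
        · obtain ⟨g, hg, rfl⟩ := List.mem_map.1 hx
          simpa using h g hg)
  simp only [List.map_cons, PySem.Chars.join_singleton] at key
  simp only [PySem.Str.join]
  congr 1
  simp only [List.map_cons, List.map_map]
  convert key using 2
  · simp [Function.comp, PySem.Str.join]
  · simp [List.map_flatten]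

theorem pvSize_pos (graph : List (String × List String)) (sid : String) (vis : List String) :
    1 ≤ pvSize graph sid vis := by
  rw [pvSize]
  split <;> omega

theorem pvLines_ne_nil (graph : List (String × List String)) (status_map : List (String × String))
    (sid : String) (depth : Int) (vis : List String) :
    pvLines graph status_map sid depth vis ≠ [] := by
  rw [pvLines]
  split <;> simp

theorem pvGoA_eq_join (graph : List (String × List String)) (status_map : List (String × String))
    (sid : String) (depth : Int) (vis : List String) :
    pvGoA graph status_map sid depth vis = PySem.Str.join "\n" (pvLines graph status_map sid depth vis) := by
  induction sid, depth, vis using pvLines.induct graph status_map with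
  | case1 sid depth vis hc =>
    rw [pvGoA, pvLines]
    rw [dif_pos hc, dif_pos hc]
    simp [PySem.Str.join, PySem.Chars.join_singleton]
  | case2 sid depth vis hc vis' ih =>
    have hv : vis' = PySem.Set.add vis sid := rfl
    rw [hv] at ih
    rw [pvGoA, pvLines]
    rw [dif_neg hc, dif_neg hc]
    simp only
    have hmap : (PySem.Dict.getD (PySem.Dict.mk graph) sid []).attach.map
        (fun d => pvGoA graph status_map d.1 (depth + 1) (PySem.Set.add vis sid))
        = ((PySem.Dict.getD (PySem.Dict.mk graph) sid []).attach.map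
            (fun d => pvLines graph status_map d.1 (depth + 1) (PySem.Set.add vis sid))).map
          (PySem.Str.join "\n") := by
      rw [List.map_map]
      exact List.map_congr_left (fun d _ => ih d)
    rw [hmap, pvStrJoinFlatten _ _ (by
      intro x hx
      obtain ⟨d, _, rfl⟩ := List.mem_map.1 hx
      exact pvLines_ne_nil graph status_map d.1 (depth + 1) (PySem.Set.add vis sid))]
    congr 1

theorem pvGetD_len_le (graph : List (String × List String)) (sid : String) :
    (PySem.Dict.getD (PySem.Dict.mk graph) sid []).length ≤ (graph.map (fun p => p.2.length)).sum := by
  induction graph with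
  | nil => simp [PySem.Dict.getD_eq_get?_getD, PySem.Dict.get?]
  | cons p rest ih =>
    obtain ⟨k, v⟩ := p
    rw [PySem.Dict.getD_eq_get?_getD, PySem.Dict.get?_mk_cons]
    by_cases hk : (k == sid) = true
    · simp [hk]
    · rw [Bool.not_eq_true] at hk
      simp only [hk, Bool.false_eq_true, if_false, List.map_cons, List.sum_cons]
      rw [← PySem.Dict.getD_eq_get?_getD]
      omega

theorem pvSize_le (graph : List (String × List String)) (sid : String) (vis : List String) :
    pvSize graph sid vis ≤ ((graph.map (fun p => p.2.length)).sum + 1) ^ (pvW graph vis + 1) := by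
  induction sid, vis using pvSize.induct graph with
  | case1 sid vis hc =>
    rw [pvSize, dif_pos hc]
    exact Nat.one_le_pow _ _ (by omega)
  | case2 sid vis hc ih =>
    rw [pvSize, dif_neg hc]
    by_cases hdeps : PySem.Dict.getD (PySem.Dict.mk graph) sid [] = []
    · have hcollapse : ((PySem.Dict.getD (PySem.Dict.mk graph) sid []).attach.map
          (fun d => pvSize graph d.1 (PySem.Set.add vis sid))).sum
          = ((PySem.Dict.getD (PySem.Dict.mk graph) sid []).map
            (fun dep => pvSize graph dep (PySem.Set.add vis sid))).sum := by simp
      rw [hcollapse, hdeps]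
      simpa using Nat.one_le_pow (pvW graph vis + 1) ((graph.map (fun p => p.2.length)).sum + 1) (by omega)
    · obtain ⟨d0, hd0⟩ := List.exists_mem_of_ne_nil _ hdeps
      have hsidkeys : sid ∈ graph.map Prod.fst :=
        pv_mem_keys_of_getD_mem graph sid d0 hd0
      have hWlt : pvW graph (PySem.Set.add vis sid) < pvW graph vis :=
        pvW_lt graph vis sid hsidkeys (by simpa using hc)
      set D := (graph.map (fun p => p.2.length)).sum with hD
      set deps := PySem.Dict.getD (PySem.Dict.mk graph) sid [] with hdepsdef
      have hlen : deps.length ≤ D := pvGetD_len_le graph sid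
      set W := pvW graph vis with hW
      set W' := pvW graph (PySem.Set.add vis sid) with hW'
      have hsum : (deps.attach.map (fun d => pvSize graph d.1 (PySem.Set.add vis sid))).sum
          ≤ deps.length * ((D + 1) ^ (W' + 1)) := by
        calc (deps.attach.map (fun d => pvSize graph d.1 (PySem.Set.add vis sid))).sum
            ≤ (deps.attach.map (fun _ => (D + 1) ^ (W' + 1))).sum :=
              List.sum_le_sum (fun d _ => ih d)
          _ = deps.length * ((D + 1) ^ (W' + 1)) := by
              simp [List.map_const']
      have hpow : (D + 1) ^ (W' + 1) ≤ (D + 1) ^ W :=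
        Nat.pow_le_pow_right (by omega) (by omega)
      have h1 : 1 ≤ (D + 1) ^ W := Nat.one_le_pow _ _ (by omega)
      have hmul : deps.length * ((D + 1) ^ (W' + 1)) ≤ D * ((D + 1) ^ W) :=
        Nat.mul_le_mul hlen hpow
      have hsplit : (D + 1) ^ (W + 1) = (D + 1) ^ W + D * ((D + 1) ^ W) := by
        rw [pow_succ]; ring
      omega

theorem pvLoopB_eq (graph : List (String × List String)) (status_map : List (String × String))
    (fuel : Nat) (frames : List (String × Int × List String)) (acc : List String)
    (h : (frames.map (fun f => pvSize graph f.1 f.2.2)).sum ≤ fuel) :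
    pvLoopB graph status_map fuel frames acc
      = acc ++ frames.flatMap (fun f => pvLines graph status_map f.1 f.2.1 f.2.2) := by
  induction fuel generalizing frames acc with
  | zero =>
    rcases frames with _ | ⟨⟨sid, d, vis⟩, rest⟩
    · simp [pvLoopB]
    · exfalso
      have h1 := pvSize_pos graph sid vis
      simp only [List.map_cons, List.sum_cons] at h
      omega
  | succ n ih =>
    rcases frames with _ | ⟨⟨sid, d, vis⟩, rest⟩
    · simp [pvLoopB]
    · simp only [List.map_cons, List.sum_cons] at h
      by_cases hc : PySem.Set.contains vis sid = true
      · have hsz : pvSize graph sid vis = 1 := by rw [pvSize, dif_pos hc]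
        rw [pvLoopB]
        simp only [if_pos hc]
        rw [ih rest _ (by omega)]
        rw [List.flatMap_cons]
        rw [pvLines, dif_pos hc]
        simp [List.append_assoc]
      · have hsz : pvSize graph sid vis = 1 +
            ((PySem.Dict.getD (PySem.Dict.mk graph) sid []).attach.map
              (fun d => pvSize graph d.1 (PySem.Set.add vis sid))).sum := by
          rw [pvSize, dif_neg hc]
        rw [pvLoopB]
        simp only [if_neg hc]
        have hattach : ((PySem.Dict.getD (PySem.Dict.mk graph) sid []).attach.map
            (fun d => pvSize graph d.1 (PySem.Set.add vis sid))).sum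
            = ((PySem.Dict.getD (PySem.Dict.mk graph) sid []).map
              (fun dep => pvSize graph dep (PySem.Set.add vis sid))).sum := by
          congr 1
          simp
        have hsum' : ((((PySem.Dict.getD (PySem.Dict.mk graph) sid []).map
              (fun dep => (dep, d + 1, PySem.Set.add vis sid))) ++ rest).map
                (fun f => pvSize graph f.1 f.2.2)).sum ≤ n := by
          have e1 : ((((PySem.Dict.getD (PySem.Dict.mk graph) sid []).map
                (fun dep => (dep, d + 1, PySem.Set.add vis sid))) ++ rest).map
                  (fun f => pvSize graph f.1 f.2.2)).sum
              = ((PySem.Dict.getD (PySem.Dict.mk graph) sid []).map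
                  (fun dep => pvSize graph dep (PySem.Set.add vis sid))).sum
                + (rest.map (fun f => pvSize graph f.1 f.2.2)).sum := by
            simp [Function.comp_def]
          rw [e1]
          omega
        rw [ih _ _ hsum']
        rw [List.flatMap_cons]
        rw [pvLines, dif_neg hc]
        have hat2 : (PySem.Dict.getD (PySem.Dict.mk graph) sid []).attach.flatMap
            (fun x => pvLines graph status_map x.1 (d + 1) (PySem.Set.add vis sid))
            = (PySem.Dict.getD (PySem.Dict.mk graph) sid []).flatMap
              (fun dep => pvLines graph status_map dep (d + 1) (PySem.Set.add vis sid)) := by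
          simp
        simp only [List.flatMap_append, List.flatMap_map, hat2, List.append_assoc,
          List.cons_append]
        simp

-- ===== VERDICT (by name: the statement is the Claim_ definition above) =====
theorem generate_visualization_spec : Claim_equal_generate_visualization := by
  intro story_id graph status_map depth visited _
  unfold Spec_generate_visualization generate_visualization generate_visualization_alt
  simp only
  have hfuel : (([(story_id, depth, visited.getD [])].map
      (fun f => pvSize graph f.1 f.2.2)).sum)
      ≤ ((graph.map (fun p => p.2.length)).sum + 1) ^
        ((graph.map Prod.fst ++ (graph.map Prod.snd).flatten).length + 1) := by
    simp only [List.map_cons, List.map_nil, List.sum_cons, List.sum_nil, Nat.add_zero]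
    calc pvSize graph story_id (visited.getD [])
        ≤ ((graph.map (fun p => p.2.length)).sum + 1) ^
          (pvW graph (visited.getD []) + 1) :=
          pvSize_le graph story_id _
      _ ≤ ((graph.map (fun p => p.2.length)).sum + 1) ^
          ((graph.map Prod.fst ++ (graph.map Prod.snd).flatten).length + 1) := by
          apply Nat.pow_le_pow_right (by omega)
          have hle := List.length_filter_le
            (fun x => !(PySem.Set.contains (visited.getD []) x))
            (graph.map Prod.fst ++ (graph.map Prod.snd).flatten)
          unfold pvW
          omega
  rw [pvLoopB_eq _ _ _ _ _ hfuel]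
  simp only [List.flatMap_cons, List.flatMap_nil, List.append_nil, List.nil_append]
  exact pvGoA_eq_join graph status_map story_id depth _
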